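-- pv_equiv track=rewrite | github.com/ilove8790/mylibs | mylibs/myCommon.py | get_colorname_from_filename
-- ===== SOURCE A (Python) =====
-- def get_colorname_from_filename(filename: str, colornames: list) -> str:
--     """
--     주어진 색상명 리스트에서 파일명에 포함된 색상명을 추출하여 반환한다.
--
--     Args:
--     filename (str): 파일명
--     colornames_list (list): 색상명 리스트
--
--     Return:
--     colorname (str): 파일명에 포함된 색상명
--     """
--     if not colornames:
--         colornames = ['Red', 'Green', 'Blue', 'White', 'Cyan', 'Magenta', 'Yellow']
--
--     fnlist = filename.replace(' ','_').replace('.','_').replace('-','_').split('_')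
--     cnames = []
--     for key in colornames:
--         indices = [i for i, x in enumerate(fnlist) if str(x).lower() == key.lower()]
--         if indices:
--             cnames.append(key)
--     if len(cnames) == 1:
--         return cnames[0]
--     elif len(cnames) > 1:
--         return cnames[-1]
--     else:
--         return ""
-- ===== SOURCE B (Python) =====
-- def get_colorname_from_filename(filename: str, colornames: list) -> str:
--     if not colornames:
--         colornames = ['Red', 'Green', 'Blue', 'White', 'Cyan', 'Magenta', 'Yellow']
--     # lowercased name -> its latest index in colornames (later entries overwrite)
--     index = {}
--     for i, name in enumerate(colornames):
--         index[name.lower()] = i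
--     best = -1
--     for tok in filename.replace(' ', '_').replace('.', '_').replace('-', '_').split('_'):
--         j = index.get(tok.lower(), -1)
--         if j > best:
--             best = j
--     return colornames[best] if best >= 0 else ""
-- ===== Notes on version B (the rewrite author's own statement) =====
-- stated objective: faster
-- what changed: Instead of scanning colornames and, for each name, scanning all filename tokens to collect every matching name and take the last, B builds a lowercase-name-to-latest-index dict once and makes a single pass over the tokens maintaining a running maximum index, returning colornames[best] or "".
import Mathlib
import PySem

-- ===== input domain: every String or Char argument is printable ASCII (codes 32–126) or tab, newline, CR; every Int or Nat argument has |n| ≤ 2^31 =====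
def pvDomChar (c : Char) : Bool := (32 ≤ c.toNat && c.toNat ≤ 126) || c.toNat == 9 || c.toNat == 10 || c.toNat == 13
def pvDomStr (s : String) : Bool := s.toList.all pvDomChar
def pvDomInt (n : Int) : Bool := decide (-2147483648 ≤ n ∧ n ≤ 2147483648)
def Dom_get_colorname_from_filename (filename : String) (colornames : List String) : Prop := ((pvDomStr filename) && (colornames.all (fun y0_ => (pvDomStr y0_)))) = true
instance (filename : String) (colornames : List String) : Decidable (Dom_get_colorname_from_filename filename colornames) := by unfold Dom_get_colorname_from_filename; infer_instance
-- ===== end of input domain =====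

-- B replaces A's scan over colornames (collect all matching names, take the last) by a single
-- pass over the filename tokens with a lowercase-name → latest-index table (objective: alternative).

-- tokenization shared by both Pythons: replace ' ','.','-' by '_' then split on '_'
-- (split? returns none only for sep = ""; sep is "_" here, so .getD [] is exact)
def pvTokens (filename : String) : List String :=
  (PySem.Str.split?
    (PySem.Str.replace (PySem.Str.replace (PySem.Str.replace filename " " "_") "." "_") "-" "_")
    "_").getD []

def pvDefaultColors : List String := ["Red", "Green", "Blue", "White", "Cyan", "Magenta", "Yellow"]

-- ===== PORT A =====
def get_colorname_from_filename (filename : String) (colornames : List String) : String :=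
  let colornames := if colornames = [] then pvDefaultColors else colornames
  let fnlist := pvTokens filename
  let cnames := colornames.foldl (fun acc key =>
      let indices := ((PySem.List.enumerate fnlist 0).filter
          (fun p => PySem.Str.lower p.2 == PySem.Str.lower key)).map (fun p => p.1)
      if indices ≠ [] then acc ++ [key] else acc) []
  if cnames.length = 1 then PySem.List.pyGetD cnames 0 ""
  else if cnames.length > 1 then PySem.List.pyGetD cnames (-1) ""
  else ""

-- ===== PORT B =====
def get_colorname_from_filename_alt (filename : String) (colornames : List String) : String :=
  let colornames := if colornames = [] then pvDefaultColors else colornames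
  let index := (PySem.List.enumerate colornames 0).foldl
      (fun d p => d.insert (PySem.Str.lower p.2) p.1) PySem.Dict.empty
  let best := (pvTokens filename).foldl
      (fun b t => let j := index.getD (PySem.Str.lower t) (-1); if j > b then j else b) (-1)
  -- Python's colornames[best]: best is always a valid index when ≥ 0, so .getD "" is exact
  if best ≥ 0 then (PySem.List.pyGet? colornames best).getD "" else ""

-- ===== PRECONDITION & SPEC =====
def Spec_get_colorname_from_filename (filename : String) (colornames : List String) (out : String) : Prop := out = get_colorname_from_filename_alt filename colornames
instance (filename : String) (colornames : List String) (out : String) : Decidable (Spec_get_colorname_from_filename filename colornames out) := by unfold Spec_get_colorname_from_filename; infer_instance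

-- ===== CLAIM (what is proved, stated in full; the proofs are below) =====
def Claim_equal_get_colorname_from_filename : Prop := ∀ (filename : String) (colornames : List String), Dom_get_colorname_from_filename filename colornames → Spec_get_colorname_from_filename filename colornames (get_colorname_from_filename filename colornames)

-- ===== LEMMAS AND PROOFS =====

-- last index in cs (as an enumerate entry) whose lowercased name is s, else -1
def lastIdx (cs : List String) (s : String) : Int :=
  match ((PySem.List.enumerate cs 0).filter (fun p => PySem.Str.lower p.2 == s)).getLast? with
  | some p => p.1
  | none => -1

-- the enumerate entries of cs matched by some token of ts
def matched (cs : List String) (ts : List String) : List (Int × String) :=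
  (PySem.List.enumerate cs 0).filter
    (fun p => ts.any (fun t => PySem.Str.lower t == PySem.Str.lower p.2))

-- the common value both ports compute
def lastMatch (cs : List String) (ts : List String) : String :=
  match (matched cs ts).getLast? with
  | some p => p.2
  | none => ""

theorem dict_foldl_getD (l : List (Int × String)) (d : PySem.Dict String Int) (s : String) :
    (l.foldl (fun d p => d.insert (PySem.Str.lower p.2) p.1) d).getD s (-1)
    = match (l.filter (fun p => PySem.Str.lower p.2 == s)).getLast? with
      | some p => p.1
      | none => d.getD s (-1) := by
  induction l generalizing d with
  | nil => simp
  | cons x l ih =>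
    simp only [List.foldl_cons, List.filter_cons]
    rw [ih]
    by_cases hx : PySem.Str.lower x.2 = s
    · simp only [hx, beq_self_eq_true, if_pos]
      cases hfl : (l.filter (fun p => PySem.Str.lower p.2 == s)).getLast? with
      | some q => simp [List.getLast?_cons, hfl]
      | none =>
        have : l.filter (fun p => PySem.Str.lower p.2 == s) = [] :=
          List.getLast?_eq_none_iff.mp hfl
        simp [List.getLast?_cons, hfl]
    · have : (PySem.Str.lower x.2 == s) = false := beq_false_of_ne hx
      simp only [this, Bool.false_eq_true, if_neg, not_false_iff]
      cases hfl : (l.filter (fun p => PySem.Str.lower p.2 == s)).getLast? with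
      | some q => simp
      | none => simp [PySem.Dict.getD_insert, Ne.symm hx]

theorem lastIdx_neg_one_iff (cs : List String) (s : String) :
    lastIdx cs s = -1 ↔ ∀ p ∈ PySem.List.enumerate cs 0, PySem.Str.lower p.2 ≠ s := by
  unfold lastIdx
  cases hfl : ((PySem.List.enumerate cs 0).filter (fun p => PySem.Str.lower p.2 == s)).getLast? with
  | some q =>
    have hq := List.mem_of_getLast? hfl
    have := List.of_mem_filter hq
    have hmem := List.mem_of_mem_filter hq
    constructor
    · intro h
      exfalso
      have h' : q.1 = -1 := h
      have h0 : (0:Int) ≤ q.1 := by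
        rcases (PySem.List.mem_enumerate_iff cs 0 q).mp hmem with ⟨k, hk, rfl⟩
        simp
      omega
    · intro h; exact absurd (eq_of_beq this) (h q hmem)
  | none =>
    have hfl' := List.getLast?_eq_none_iff.mp hfl
    simp only [List.filter_eq_nil_iff] at hfl'
    constructor
    · intro _ p hp hps; exact absurd (beq_iff_eq.mpr hps) (by simpa using hfl' p hp)
    · intro _; rfl

theorem lastIdx_nonneg (cs : List String) (s : String) (q : _root_.Prod Int String)
    (hq : ((PySem.List.enumerate cs 0).filter (fun p => PySem.Str.lower p.2 == s)).getLast? = some q) :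
    lastIdx cs s = q.1 := by
  unfold lastIdx; rw [hq]

-- last element of a pairwise-<-list is an upper bound
theorem getLast?_isMax (l : List (Int × String)) (p : Int × String)
    (hpw : List.Pairwise (fun a b => a.1 < b.1) l) (hl : l.getLast? = some p) :
    ∀ q ∈ l, q.1 ≤ p.1 := by
  rcases List.getLast?_eq_some_iff.mp hl with ⟨l', rfl⟩
  intro q hq
  rcases List.mem_append.mp hq with h | h
  · have := List.pairwise_append.mp hpw
    exact le_of_lt (this.2.2 q h p (List.mem_singleton_self p))
  · simp only [List.mem_singleton] at h; simp [h]

theorem pairwise_matched (cs ts : List String) :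
    List.Pairwise (fun a b => a.1 < b.1) (matched cs ts) :=
  (PySem.List.pairwise_lt_enumerate cs 0).filter _

theorem pairwise_filter_lower (cs : List String) (s : String) :
    List.Pairwise (fun a b => a.1 < b.1)
      ((PySem.List.enumerate cs 0).filter (fun p => PySem.Str.lower p.2 == s)) :=
  (PySem.List.pairwise_lt_enumerate cs 0).filter _

-- a running max never decreases
theorem foldl_if_max_mono (ts : List String) (f : String → Int) :
    ∀ (b : Int), b ≤ ts.foldl (fun b t => if f t > b then f t else b) b := by
  induction ts with
  | nil => simp
  | cons y ys ihy =>
    intro b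
    simp only [List.foldl_cons]
    refine le_trans ?_ (ihy _)
    by_cases hy : f y > b <;> simp [hy] <;> omega

-- fold of running max (written with if) is bounded by any common bound
theorem foldl_if_max_le (ts : List String) (f : String → Int) (m : Int) :
    ∀ (b : Int), b ≤ m → (∀ t ∈ ts, f t ≤ m) →
      ts.foldl (fun b t => if f t > b then f t else b) b ≤ m := by
  induction ts with
  | nil => intro b hb _; simpa using hb
  | cons x ts ih =>
    intro b hb h
    simp only [List.foldl_cons]
    refine ih _ ?_ (fun t ht => h t (List.mem_cons_of_mem _ ht))
    have := h x (List.mem_cons_self)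
    by_cases hx : f x > b <;> simp [hx] <;> omega

theorem le_foldl_if_max (ts : List String) (f : String → Int) (t0 : String) (ht0 : t0 ∈ ts) :
    ∀ (b : Int), f t0 ≤ ts.foldl (fun b t => if f t > b then f t else b) b := by
  induction ts with
  | nil => exact absurd ht0 (List.not_mem_nil)
  | cons x ts ih =>
    intro b
    simp only [List.foldl_cons]
    rcases List.mem_cons.mp ht0 with rfl | h
    · refine le_trans ?_ (foldl_if_max_mono ts f _)
      by_cases hx : f t0 > b <;> simp [hx] <;> omega
    · exact ih h _

theorem foldl_if_max_const (ts : List String) (f : String → Int)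
    (h : ∀ t ∈ ts, f t = -1) :
    ts.foldl (fun b t => if f t > b then f t else b) (-1) = -1 := by
  induction ts with
  | nil => rfl
  | cons x ts ih =>
    simp only [List.foldl_cons]
    rw [h x List.mem_cons_self]
    simp only [show ¬((-1:Int) > -1) by omega, if_neg, not_false_iff]
    exact ih (fun t ht => h t (List.mem_cons_of_mem _ ht))

theorem predA_eq_any (ts : List String) :
    (fun key => decide (((PySem.List.enumerate ts 0).filter
          (fun p => PySem.Str.lower p.2 == PySem.Str.lower key)).map (fun p => p.1) ≠ []))
      = (fun key => ts.any (fun t => PySem.Str.lower t == PySem.Str.lower key)) := by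
  funext key
  rw [Bool.eq_iff_iff]
  simp only [decide_eq_true_eq, ne_eq, List.map_eq_nil_iff, List.any_eq_true]
  constructor
  · intro hne
    rcases List.exists_mem_of_ne_nil _ hne with ⟨p, hp⟩
    have hpe := List.mem_of_mem_filter hp
    have hpp := List.of_mem_filter hp
    rcases (PySem.List.mem_enumerate_iff ts 0 p).mp hpe with ⟨k, hk, rfl⟩
    exact ⟨ts[k], List.getElem_mem hk, hpp⟩
  · intro h hcon
    rcases h with ⟨t, ht, hbeq⟩
    rcases List.getElem_of_mem ht with ⟨k, hk, rfl⟩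
    have hp : ((0:Int) + (k:Int), ts[k]) ∈ (PySem.List.enumerate ts 0).filter
        (fun p => PySem.Str.lower p.2 == PySem.Str.lower key) := by
      refine List.mem_filter.mpr ⟨(PySem.List.mem_enumerate_iff ts 0 _).mpr ⟨k, hk, rfl⟩, ?_⟩
      exact hbeq
    rw [hcon] at hp
    exact List.not_mem_nil hp

theorem filter_eq_map_matched (cs ts : List String) :
    cs.filter (fun key => ts.any (fun t => PySem.Str.lower t == PySem.Str.lower key))
      = (matched cs ts).map (fun p => p.2) := by
  unfold matched
  conv_lhs => rw [← PySem.List.map_snd_enumerate cs 0]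
  rw [List.filter_map]
  rfl

-- ===== A equals lastMatch =====
set_option maxHeartbeats 1000000 in
theorem portA_eq (filename : String) (colornames : List String) :
    get_colorname_from_filename filename colornames
      = lastMatch (if colornames = [] then pvDefaultColors else colornames) (pvTokens filename) := by
  unfold get_colorname_from_filename lastMatch
  set cs := if colornames = [] then pvDefaultColors else colornames with hcs
  set ts := pvTokens filename with hts
  -- rewrite A's foldl as a filter
  have hfold : cs.foldl (fun acc key =>
      let indices := ((PySem.List.enumerate ts 0).filter
          (fun p => PySem.Str.lower p.2 == PySem.Str.lower key)).map (fun p => p.1)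
      if indices ≠ [] then acc ++ [key] else acc) []
      = cs.filter (fun key => decide (((PySem.List.enumerate ts 0).filter
          (fun p => PySem.Str.lower p.2 == PySem.Str.lower key)).map (fun p => p.1) ≠ [])) := by
    simpa using PySem.List.foldl_append_ite_eq_filter
      (fun key => ((PySem.List.enumerate ts 0).filter
          (fun p => PySem.Str.lower p.2 == PySem.Str.lower key)).map (fun p => p.1) ≠ []) cs []
  simp only [hfold]
  rw [predA_eq_any ts, filter_eq_map_matched cs ts]
  cases hml : (matched cs ts).getLast? with
  | none =>
    have hnil : matched cs ts = [] := List.getLast?_eq_none_iff.mp hml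
    simp [hnil]
  | some p =>
    rcases List.getLast?_eq_some_iff.mp hml with ⟨m', hm'⟩
    rw [hm']
    rcases m' with _ | ⟨q, m''⟩
    · simp [PySem.List.pyGetD]
    · have hlen : (((q :: m'') ++ [p]).map (fun p => p.2)).length > 1 := by simp
      have hne : (((q :: m'') ++ [p]).map (fun p => p.2)) ≠ [] := by simp
      have h1 : ¬((((q :: m'') ++ [p]).map (fun p => p.2)).length = 1) := by omega
      simp only [h1, if_neg, not_false_iff, hlen, if_pos]
      rw [PySem.List.pyGetD_neg_one _ _ hne]
      rw [List.getLast_eq_iff_getLast?_eq_some, List.getLast?_map,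
        show q :: m'' ++ [p] = (q :: m'') ++ [p] from rfl, List.getLast?_concat]
      rfl

-- ===== B equals lastMatch =====
set_option maxHeartbeats 1000000 in
theorem portB_eq (filename : String) (colornames : List String) :
    get_colorname_from_filename_alt filename colornames
      = lastMatch (if colornames = [] then pvDefaultColors else colornames) (pvTokens filename) := by
  unfold get_colorname_from_filename_alt lastMatch
  set cs := if colornames = [] then pvDefaultColors else colornames with hcs
  set ts := pvTokens filename with hts
  -- the dict lookup is lastIdx
  have hdict : ∀ t : String,
      ((PySem.List.enumerate cs 0).foldl
        (fun d p => d.insert (PySem.Str.lower p.2) p.1) PySem.Dict.empty).getD (PySem.Str.lower t) (-1)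
      = lastIdx cs (PySem.Str.lower t) := by
    intro t
    rw [dict_foldl_getD]
    unfold lastIdx
    cases ((PySem.List.enumerate cs 0).filter
        (fun p => PySem.Str.lower p.2 == PySem.Str.lower t)).getLast? <;> simp
  simp only [hdict]
  rw [show (fun (b : Int) (t : String) => let j := lastIdx cs (PySem.Str.lower t);
        if j > b then j else b)
      = (fun (b : Int) (t : String) => if lastIdx cs (PySem.Str.lower t) > b
          then lastIdx cs (PySem.Str.lower t) else b) from rfl]
  cases hml : (matched cs ts).getLast? with
  | none =>
    have hnil : matched cs ts = [] := List.getLast?_eq_none_iff.mp hml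
    have hall : ∀ t ∈ ts, lastIdx cs (PySem.Str.lower t) = -1 := by
      intro t ht
      rw [lastIdx_neg_one_iff]
      intro p hp hps
      have : p ∈ matched cs ts := by
        unfold matched
        refine List.mem_filter.mpr ⟨hp, ?_⟩
        exact List.any_eq_true.mpr ⟨t, ht, beq_iff_eq.mpr hps.symm⟩
      rw [hnil] at this
      exact List.not_mem_nil this
    rw [foldl_if_max_const ts _ hall]
    simp
  | some p =>
    have hpmem : p ∈ matched cs ts := List.mem_of_getLast? hml
    have hpenum : p ∈ PySem.List.enumerate cs 0 := List.mem_of_mem_filter hpmem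
    rcases (PySem.List.mem_enumerate_iff cs 0 p).mp hpenum with ⟨k, hk, hpk⟩
    have hppred := List.of_mem_filter hpmem
    simp only at hppred
    rcases List.any_eq_true.mp hppred with ⟨t0, ht0, hbeq0⟩
    have hlow0 : PySem.Str.lower t0 = PySem.Str.lower p.2 := eq_of_beq hbeq0
    -- upper bound: every token's lastIdx ≤ p.1
    have hub : ∀ t ∈ ts, lastIdx cs (PySem.Str.lower t) ≤ p.1 := by
      intro t ht
      cases hfl : ((PySem.List.enumerate cs 0).filter
          (fun q => PySem.Str.lower q.2 == PySem.Str.lower t)).getLast? with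
      | none =>
        have h0 : lastIdx cs (PySem.Str.lower t) = -1 := by unfold lastIdx; rw [hfl]
        have h1 : (0:Int) ≤ p.1 := by rw [hpk]; simp
        omega
      | some q =>
        rw [lastIdx_nonneg cs _ q hfl]
        have hqmem := List.mem_of_getLast? hfl
        have hqenum := List.mem_of_mem_filter hqmem
        have hqpred := List.of_mem_filter hqmem
        have hqmatched : q ∈ matched cs ts := by
          unfold matched
          refine List.mem_filter.mpr ⟨hqenum, ?_⟩
          exact List.any_eq_true.mpr ⟨t, ht, beq_iff_eq.mpr (eq_of_beq hqpred).symm⟩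
        exact getLast?_isMax _ p (pairwise_matched cs ts) hml q hqmatched
    -- the witness token attains p.1
    have hwit : lastIdx cs (PySem.Str.lower t0) = p.1 := by
      cases hfl : ((PySem.List.enumerate cs 0).filter
          (fun q => PySem.Str.lower q.2 == PySem.Str.lower t0)).getLast? with
      | none =>
        exfalso
        have := List.getLast?_eq_none_iff.mp hfl
        simp only [List.filter_eq_nil_iff] at this
        exact absurd (beq_iff_eq.mpr hlow0.symm) (by simpa using this p hpenum)
      | some q =>
        rw [lastIdx_nonneg cs _ q hfl]
        have hple : p.1 ≤ q.1 := by
          have hpin : p ∈ (PySem.List.enumerate cs 0).filter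
              (fun q => PySem.Str.lower q.2 == PySem.Str.lower t0) :=
            List.mem_filter.mpr ⟨hpenum, beq_iff_eq.mpr hlow0.symm⟩
          exact getLast?_isMax _ q (pairwise_filter_lower cs _) hfl p hpin
        have hqle : q.1 ≤ p.1 := by
          have := hub t0 ht0
          rwa [lastIdx_nonneg cs _ q hfl] at this
        omega
    have hbest : ts.foldl (fun b t => if lastIdx cs (PySem.Str.lower t) > b
        then lastIdx cs (PySem.Str.lower t) else b) (-1) = p.1 := by
      have h1 := le_foldl_if_max ts (fun t => lastIdx cs (PySem.Str.lower t)) t0 ht0 (-1)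
      have h2 := foldl_if_max_le ts (fun t => lastIdx cs (PySem.Str.lower t)) p.1 (-1)
        (by rw [hpk]; simp) hub
      simp only at h1 h2
      omega
    rw [hbest]
    have hp1 : p.1 = (k : Int) := by rw [hpk]; simp
    rw [hp1]
    simp only [show ((0:Int) ≤ (k:Int)) by omega, if_pos]
    rw [PySem.List.pyGet?_natCast]
    have : cs[k]? = some cs[k] := List.getElem?_eq_getElem hk
    rw [this]
    have : p.2 = cs[k] := by rw [hpk]
    simp [this]

-- ===== VERDICT (by name: the statement is the Claim_ definition above) =====
theorem get_colorname_from_filename_spec : Claim_equal_get_colorname_from_filename := by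
  intro filename colornames _
  unfold Spec_get_colorname_from_filename
  rw [portA_eq, portB_eq]
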